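-- pv_equiv track=rewrite | github.com/shivanshsanoria1/LeetcodeSolutions | stats/chart-generator.py | generateHistogramBuckets
-- ===== SOURCE A (Python) =====
-- from typing import List, Dict
--
-- def generateHistogramBuckets(stats: List[Dict], bucketSize: int = 100) -> List[int]:
--     maxQuesId = 0
--     for stat in stats:
--         if stat.get('isAccepted'):
--             maxQuesId = max(maxQuesId, stat.get('quesId'))
--
--     bucketCount = (maxQuesId - 1) // bucketSize + 1
--     buckets = [0] * bucketCount
--
--     for stat in stats:
--         if not stat.get('isAccepted'):
--             continue
--
--         quesId = stat.get('quesId')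
--
--         bucketIdx = (quesId - 1) // bucketSize
--         buckets[bucketIdx] += 1
--
--     return buckets
-- ===== SOURCE B (Python) =====
-- from typing import List, Dict
--
-- def generateHistogramBuckets(stats: List[Dict], bucketSize: int = 100) -> List[int]:
--     # Single pass: count accepted ids per bucket in a dict while tracking the max id,
--     # then materialise the histogram from the dict. Ids that fall below bucket 0
--     # (quesId <= 0 with a positive bucketSize) are simply not counted, instead of
--     # being aliased into the tail buckets by Python's negative indexing as in A.
--     counts = {}
--     maxQuesId = 0
--     for stat in stats:
--         if stat.get('isAccepted'):
--             quesId = stat.get('quesId')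
--             maxQuesId = max(maxQuesId, quesId)
--             bucketIdx = (quesId - 1) // bucketSize
--             counts[bucketIdx] = counts.get(bucketIdx, 0) + 1
--     bucketCount = (maxQuesId - 1) // bucketSize + 1
--     return [counts.get(j, 0) for j in range(bucketCount)]
-- ===== Notes on version B (the rewrite author's own statement) =====
-- stated objective: alternative
-- what changed: Replaces A's two scans over stats and in-place list increments by a single scan that counts per bucket index in a dict while tracking the max id, then materialises the histogram with one lookup per bucket; ids below bucket 0 are dropped instead of aliased.
-- intended difference: On inputs where some accepted stat has bucket index (quesId-1)//bucketSize < 0 (e.g. quesId <= 0 with a positive bucketSize), A's buckets[bucketIdx] += 1 wraps the negative index around and silently inflates a tail bucket, while B does not count such ids at all; B's histogram is the intended one since question ids below bucket 0 do not belong to any bucket. — e.g. on generateHistogramBuckets([[("isAccepted", 1), ("quesId", 0)], [("isAccepted", 1), ("quesId", 1)]], 100): A returns [2], B returns [1]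
import Mathlib
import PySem

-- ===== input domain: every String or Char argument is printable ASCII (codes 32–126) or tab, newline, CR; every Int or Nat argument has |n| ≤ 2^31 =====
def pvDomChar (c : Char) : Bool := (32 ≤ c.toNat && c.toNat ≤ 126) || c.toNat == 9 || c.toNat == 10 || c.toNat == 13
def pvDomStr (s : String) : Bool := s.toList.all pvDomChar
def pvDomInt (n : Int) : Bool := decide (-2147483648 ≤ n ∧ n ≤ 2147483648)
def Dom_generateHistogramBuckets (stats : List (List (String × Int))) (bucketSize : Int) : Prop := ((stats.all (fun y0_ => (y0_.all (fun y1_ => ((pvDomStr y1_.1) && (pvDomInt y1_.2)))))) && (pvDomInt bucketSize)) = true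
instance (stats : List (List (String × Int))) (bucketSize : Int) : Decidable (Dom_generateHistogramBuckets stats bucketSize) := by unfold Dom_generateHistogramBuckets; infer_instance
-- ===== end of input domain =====

-- B replaces A's two scans by one counting scan into a dict plus a per-bucket lookup;
-- ids whose bucket index is negative are not counted (A aliases them into tail buckets).

-- shared input-reading helpers (reading fields of a stat dict; used by ports, Pre_ and D_)
def pvGetKey (stat : List (String × Int)) (k : String) : Option Int :=
  PySem.Dict.get? (PySem.Dict.mk stat) k

def pvAccepted (stat : List (String × Int)) : Bool :=
  match pvGetKey stat "isAccepted" with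
  | some v => v != 0
  | none => false

-- stat.get('quesId'); the default 0 is only reachable outside Pre_ (where Python raises TypeError)
def pvQuesId (stat : List (String × Int)) : Int :=
  (pvGetKey stat "quesId").getD 0

def pvIdx (stat : List (String × Int)) (bucketSize : Int) : Int :=
  PySem.Int.floordiv (pvQuesId stat - 1) bucketSize

-- ===== PORT A =====
-- buckets[i] += 1 (negative i wraps; out-of-range = IndexError, excluded by Pre_, identity here)
def pvIncr (b : List Int) (i : Int) : List Int :=
  (PySem.List.pySet? b i (PySem.List.pyGetD b i 0 + 1)).getD b

def generateHistogramBuckets (stats : List (List (String × Int))) (bucketSize : Int) : List Int :=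
  let maxQuesId := stats.foldl (fun m stat => if pvAccepted stat then max m (pvQuesId stat) else m) 0
  let bucketCount := PySem.Int.floordiv (maxQuesId - 1) bucketSize + 1
  let buckets : List Int := List.replicate bucketCount.toNat 0
  stats.foldl (fun b stat => if pvAccepted stat then pvIncr b (pvIdx stat bucketSize) else b) buckets

-- ===== PORT B =====
def pvStepCounts (bucketSize : Int) (d : PySem.Dict Int Int) (stat : List (String × Int)) : PySem.Dict Int Int :=
  if pvAccepted stat then d.insert (pvIdx stat bucketSize) (d.getD (pvIdx stat bucketSize) 0 + 1) else d

def pvStepMax (m : Int) (stat : List (String × Int)) : Int :=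
  if pvAccepted stat then max m (pvQuesId stat) else m

def generateHistogramBuckets_alt (stats : List (List (String × Int))) (bucketSize : Int) : List Int :=
  let p := stats.foldl (fun s stat => (pvStepCounts bucketSize s.1 stat, pvStepMax s.2 stat))
             (PySem.Dict.empty, 0)
  let bucketCount := PySem.Int.floordiv (p.2 - 1) bucketSize + 1
  (PySem.List.pyRange 0 bucketCount 1).map (fun j => p.1.getD j 0)

-- ===== PRECONDITION & SPEC =====
-- the number of buckets A allocates, as a plain aggregate of the input
def pvBucketCount (stats : List (List (String × Int))) (bucketSize : Int) : Int :=
  PySem.Int.floordiv (((stats.filter pvAccepted).map pvQuesId).foldl max 0 - 1) bucketSize + 1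

-- Pre_ excludes exactly the inputs where Python A raises: bucketSize = 0 (ZeroDivisionError),
-- an accepted stat without 'quesId' (TypeError in max), or a bucket index outside
-- [-bucketCount, bucketCount) (IndexError).
def Pre_generateHistogramBuckets (stats : List (List (String × Int))) (bucketSize : Int) : Prop :=
  bucketSize ≠ 0 ∧ ∀ stat ∈ stats, pvAccepted stat = true →
    (pvGetKey stat "quesId").isSome = true ∧
    -(pvBucketCount stats bucketSize) ≤ pvIdx stat bucketSize ∧
    pvIdx stat bucketSize < pvBucketCount stats bucketSize

instance (stats : List (List (String × Int))) (bucketSize : Int) : Decidable (Pre_generateHistogramBuckets stats bucketSize) := by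
  unfold Pre_generateHistogramBuckets; infer_instance

def pvWitness_generateHistogramBuckets : (List (List (String × Int))) × Int :=
  ([[("isAccepted", 1), ("quesId", 250)]], 100)

-- On inputs with an accepted stat whose bucket index (quesId-1)//bucketSize is negative
-- (e.g. quesId ≤ 0 with positive bucketSize), A wraps the negative index and inflates a
-- tail bucket, while B leaves such ids uncounted; B's histogram is the intended one.
def D_generateHistogramBuckets (stats : List (List (String × Int))) (bucketSize : Int) : Prop :=
  bucketSize ≠ 0 ∧ ∃ stat ∈ stats, pvAccepted stat = true ∧ pvIdx stat bucketSize < 0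

instance (stats : List (List (String × Int))) (bucketSize : Int) : Decidable (D_generateHistogramBuckets stats bucketSize) := by
  unfold D_generateHistogramBuckets; infer_instance

def Spec_generateHistogramBuckets (stats : List (List (String × Int))) (bucketSize : Int) (out : List Int) : Prop :=
  ¬ D_generateHistogramBuckets stats bucketSize → out = generateHistogramBuckets_alt stats bucketSize

instance (stats : List (List (String × Int))) (bucketSize : Int) (out : List Int) : Decidable (Spec_generateHistogramBuckets stats bucketSize out) := by
  unfold Spec_generateHistogramBuckets; infer_instance

def pvDiffWitness_generateHistogramBuckets : (List (List (String × Int))) × Int :=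
  ([[("isAccepted", 1), ("quesId", 0)], [("isAccepted", 1), ("quesId", 1)]], 100)

def pvDiffWitnessOut_generateHistogramBuckets : (List Int) × (List Int) := ([2], [1])

-- ===== CLAIM =====
def Claim_unchanged_generateHistogramBuckets : Prop := ∀ (stats : List (List (String × Int))) (bucketSize : Int), Dom_generateHistogramBuckets stats bucketSize → Pre_generateHistogramBuckets stats bucketSize → Spec_generateHistogramBuckets stats bucketSize (generateHistogramBuckets stats bucketSize)

def Claim_changed_generateHistogramBuckets : Prop := Dom_generateHistogramBuckets (pvDiffWitness_generateHistogramBuckets.1) (pvDiffWitness_generateHistogramBuckets.2) ∧ Pre_generateHistogramBuckets (pvDiffWitness_generateHistogramBuckets.1) (pvDiffWitness_generateHistogramBuckets.2) ∧ D_generateHistogramBuckets (pvDiffWitness_generateHistogramBuckets.1) (pvDiffWitness_generateHistogramBuckets.2) ∧ generateHistogramBuckets (pvDiffWitness_generateHistogramBuckets.1) (pvDiffWitness_generateHistogramBuckets.2) = pvDiffWitnessOut_generateHistogramBuckets.1 ∧ generateHistogramBuckets_alt (pvDiffWitness_generateHistogramBuckets.1) (pvDiffWitness_generateHistogramBuckets.2)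 = pvDiffWitnessOut_generateHistogramBuckets.2 ∧ pvDiffWitnessOut_generateHistogramBuckets.1 ≠ pvDiffWitnessOut_generateHistogramBuckets.2

def Claim_exact_generateHistogramBuckets : Prop := ∀ (stats : List (List (String × Int))) (bucketSize : Int), Dom_generateHistogramBuckets stats bucketSize → Pre_generateHistogramBuckets stats bucketSize → D_generateHistogramBuckets stats bucketSize → generateHistogramBuckets stats bucketSize ≠ generateHistogramBuckets_alt stats bucketSize

-- ===== LEMMAS AND PROOFS =====

-- the bucket indices of the accepted stats, in order
def pvIdxs (stats : List (List (String × Int))) (bucketSize : Int) : List Int :=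
  (stats.filter pvAccepted).map (fun stat => pvIdx stat bucketSize)

lemma pvIncr_length (l : List Int) (i : Int) : (pvIncr l i).length = l.length := by
  unfold pvIncr PySem.List.pySet?
  cases h : PySem.List.pyIdx? l.length i <;> simp

lemma pvIncr_nonneg (l : List Int) (i : Int) (h0 : 0 ≤ i) (h1 : i < (l.length : Int)) :
    pvIncr l i = l.set i.toNat (l.getD i.toNat 0 + 1) := by
  unfold pvIncr PySem.List.pySet? PySem.List.pyGetD PySem.List.pyGet? PySem.List.pyIdx?
  simp [h0, h1, List.getD_eq_getElem?_getD]

lemma pvIncr_neg (l : List Int) (i : Int) (h0 : -(l.length : Int) ≤ i) (h1 : i < 0) :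
    pvIncr l i = l.set (l.length - (-i).toNat) (l.getD (l.length - (-i).toNat) 0 + 1) := by
  unfold pvIncr PySem.List.pySet? PySem.List.pyGetD PySem.List.pyGet? PySem.List.pyIdx?
  simp [not_le.mpr h1, h0, List.getD_eq_getElem?_getD]

lemma foldl_pvIncr_length (idxs : List Int) (l : List Int) :
    (idxs.foldl pvIncr l).length = l.length := by
  induction idxs generalizing l with
  | nil => rfl
  | cons i rest ih => simpa [List.foldl_cons, pvIncr_length] using ih (pvIncr l i)

lemma count_cons_int (i a : Int) (rest : List Int) :
    (((i :: rest).count a : Nat) : Int) = ((rest.count a : Nat) : Int) + if i = a then 1 else 0 := by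
  rw [List.count_cons]
  by_cases h : i = a
  · simp [h]
  · simp [h]

lemma getD_set_self (l : List Int) (j : Nat) (hj : j < l.length) (v : Int) :
    (l.set j v).getD j 0 = v := by
  rw [List.getD_eq_getElem?_getD, List.getElem?_set, if_pos rfl, if_pos hj]
  rfl

lemma getD_set_ne (l : List Int) (k j : Nat) (hne : k ≠ j) (v : Int) :
    (l.set k v).getD j 0 = l.getD j 0 := by
  rw [List.getD_eq_getElem?_getD, List.getElem?_set, if_neg hne, ← List.getD_eq_getElem?_getD]

-- the heart: after all increments, entry j holds l[j] plus the number of indices that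
-- normalise to j (j itself, and its negative alias j - len)
lemma foldl_pvIncr_getElem (idxs : List Int) (l : List Int)
    (h : ∀ i ∈ idxs, -(l.length : Int) ≤ i ∧ i < (l.length : Int)) (j : Nat) (hj : j < l.length) :
    (idxs.foldl pvIncr l)[j]? =
      some (l.getD j 0 + (idxs.count ((j : Int)) : Int) + (idxs.count ((j : Int) - (l.length : Int)) : Int)) := by
  induction idxs generalizing l with
  | nil =>
    simp [List.getD_eq_getElem?_getD, List.getElem?_eq_getElem hj]
  | cons i rest ih =>
    obtain ⟨hi0, hi1⟩ := h i List.mem_cons_self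
    have hrest : ∀ x ∈ rest, -(l.length : Int) ≤ x ∧ x < (l.length : Int) :=
      fun x hx => h x (List.mem_cons_of_mem _ hx)
    rw [List.foldl_cons, count_cons_int, count_cons_int]
    by_cases hpos : 0 ≤ i
    · rw [pvIncr_nonneg l i hpos hi1]
      by_cases hij : i = (j : Int)
      · have hkj : i.toNat = j := by omega
        have hne2 : ¬ i = (j : Int) - (l.length : Int) := by omega
        rw [hkj, ih (l.set j (l.getD j 0 + 1)) (by simpa using hrest) (by simpa using hj),
            List.length_set, getD_set_self l j hj _, if_pos hij, if_neg hne2]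
        simp only [Option.some.injEq]
        ring
      · have hkj : i.toNat ≠ j := by omega
        have hne2 : ¬ i = (j : Int) - (l.length : Int) := by omega
        rw [ih (l.set i.toNat (l.getD i.toNat 0 + 1)) (by simpa using hrest) (by simpa using hj),
            List.length_set, getD_set_ne l i.toNat j hkj, if_neg hij, if_neg hne2]
        simp only [Option.some.injEq]
        ring
    · have hneg : i < 0 := by omega
      rw [pvIncr_neg l i hi0 hneg]
      by_cases hij : i = (j : Int) - (l.length : Int)
      · have hkj : l.length - (-i).toNat = j := by omega
        have hne2 : ¬ i = (j : Int) := by omega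
        rw [hkj, ih (l.set j (l.getD j 0 + 1)) (by simpa using hrest) (by simpa using hj),
            List.length_set, getD_set_self l j hj _, if_neg hne2, if_pos hij]
        simp only [Option.some.injEq]
        ring
      · have hkj : l.length - (-i).toNat ≠ j := by omega
        have hne2 : ¬ i = (j : Int) := by omega
        rw [ih (l.set (l.length - (-i).toNat) (l.getD (l.length - (-i).toNat) 0 + 1))
              (by simpa using hrest) (by simpa using hj),
            List.length_set, getD_set_ne l (l.length - (-i).toNat) j hkj, if_neg hne2, if_neg hij]
        simp only [Option.some.injEq]
        ring

lemma pvMaxfold_eq (stats : List (List (String × Int))) :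
    stats.foldl (fun m stat => if pvAccepted stat then max m (pvQuesId stat) else m) 0
      = ((stats.filter pvAccepted).map pvQuesId).foldl max 0 := by
  rw [PySem.List.foldl_if_eq_foldl_filter pvAccepted (fun m stat => max m (pvQuesId stat)),
      List.foldl_map]

-- A's whole computation, as increments of the index list over the zero table
lemma portA_eq (stats : List (List (String × Int))) (bucketSize : Int) :
    generateHistogramBuckets stats bucketSize =
      (pvIdxs stats bucketSize).foldl pvIncr
        (List.replicate (pvBucketCount stats bucketSize).toNat 0) := by
  simp only [generateHistogramBuckets]
  rw [pvMaxfold_eq]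
  unfold pvBucketCount pvIdxs
  rw [PySem.List.foldl_if_eq_foldl_filter pvAccepted (fun b stat => pvIncr b (pvIdx stat bucketSize)),
      ← List.foldl_map (f := fun stat => pvIdx stat bucketSize) (g := pvIncr)]

lemma pvCounts_eq (stats : List (List (String × Int))) (bucketSize : Int) :
    stats.foldl (pvStepCounts bucketSize) PySem.Dict.empty
      = PySem.Dict.counter (pvIdxs stats bucketSize) := by
  suffices h : ∀ (d : PySem.Dict Int Int),
      stats.foldl (pvStepCounts bucketSize) d
        = ((stats.filter pvAccepted).map (fun stat => pvIdx stat bucketSize)).foldl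
            (fun d x => d.insert x (d.getD x 0 + 1)) d by
    rw [h PySem.Dict.empty]
    unfold pvIdxs
    rw [← PySem.Dict.foldl_insert_getD_add_one_eq_counter]
  intro d
  induction stats generalizing d with
  | nil => rfl
  | cons stat rest ih =>
    rw [List.foldl_cons, List.filter_cons]
    by_cases hacc : pvAccepted stat = true
    · rw [if_pos hacc, List.map_cons, List.foldl_cons]
      have hstep : pvStepCounts bucketSize d stat
          = d.insert (pvIdx stat bucketSize) (d.getD (pvIdx stat bucketSize) 0 + 1) := by
        unfold pvStepCounts; rw [if_pos hacc]
      rw [hstep]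
      exact ih _
    · rw [if_neg hacc]
      have hstep : pvStepCounts bucketSize d stat = d := by
        unfold pvStepCounts; rw [if_neg hacc]
      rw [hstep]
      exact ih d

-- B's whole computation, as counts of the index list read off per bucket
lemma portB_eq (stats : List (List (String × Int))) (bucketSize : Int) :
    generateHistogramBuckets_alt stats bucketSize =
      (PySem.List.pyRange 0 (pvBucketCount stats bucketSize) 1).map
        (fun j => ((pvIdxs stats bucketSize).count j : Int)) := by
  simp only [generateHistogramBuckets_alt]
  rw [PySem.List.foldl_prod_mk (f := pvStepCounts bucketSize) (g := pvStepMax)]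
  simp only
  have hmax : stats.foldl pvStepMax 0
      = ((stats.filter pvAccepted).map pvQuesId).foldl max 0 := by
    unfold pvStepMax
    rw [PySem.List.foldl_if_eq_foldl_filter pvAccepted (fun m stat => max m (pvQuesId stat)),
        List.foldl_map]
  rw [hmax, pvCounts_eq]
  unfold pvBucketCount
  exact List.map_congr_left fun j _ => PySem.Dict.getD_counter _ _

-- inside Pre_, every accepted bucket index lies in [-bucketCount, bucketCount)
lemma pvIdxs_bounds (stats : List (List (String × Int))) (bucketSize : Int)
    (hPre : Pre_generateHistogramBuckets stats bucketSize) :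
    ∀ i ∈ pvIdxs stats bucketSize,
      -(pvBucketCount stats bucketSize) ≤ i ∧ i < pvBucketCount stats bucketSize := by
  intro i hi
  unfold pvIdxs at hi
  obtain ⟨stat, hst, rfl⟩ := List.mem_map.mp hi
  obtain ⟨hmem, hacc⟩ := List.mem_filter.mp hst
  exact ⟨(hPre.2 stat hmem hacc).2.1, (hPre.2 stat hmem hacc).2.2⟩

-- ===== VERDICT =====
theorem generateHistogramBuckets_spec : Claim_unchanged_generateHistogramBuckets := by
  intro stats bs _ hPre hnD
  rw [portA_eq, portB_eq]
  have hb : bs ≠ 0 := hPre.1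
  have hbounds := pvIdxs_bounds stats bs hPre
  have hnonneg : ∀ i ∈ pvIdxs stats bs, 0 ≤ i := by
    intro i hi
    unfold pvIdxs at hi
    obtain ⟨stat, hst, rfl⟩ := List.mem_map.mp hi
    obtain ⟨hmem, hacc⟩ := List.mem_filter.mp hst
    by_contra hlt
    exact hnD ⟨hb, stat, hmem, hacc, by omega⟩
  set n := pvBucketCount stats bs with hn
  have hlenA : ((pvIdxs stats bs).foldl pvIncr (List.replicate n.toNat 0)).length = n.toNat := by
    rw [foldl_pvIncr_length]; simp
  apply List.ext_getElem
  · rw [hlenA]; simp [PySem.List.length_pyRange_one]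
  · intro j h1 h2
    rw [hlenA] at h1
    have hjlen : j < (List.replicate n.toNat (0 : Int)).length := by simpa using h1
    have hge := foldl_pvIncr_getElem (pvIdxs stats bs) (List.replicate n.toNat 0)
      (by
        intro i hi
        have hbi := hbounds i hi
        have hni := hnonneg i hi
        simp only [List.length_replicate]
        omega) j hjlen
    have hzero : (pvIdxs stats bs).count ((j : Int) - (((List.replicate n.toNat (0 : Int)).length : Nat) : Int)) = 0 := by
      rw [List.count_eq_zero]
      intro hmem
      have hni := hnonneg _ hmem
      simp only [List.length_replicate] at hni ⊢
      omega
    rw [hzero, List.getD_replicate _ h1] at hge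
    rw [List.getElem?_eq_getElem (by rw [hlenA]; exact h1)] at hge
    simp only [Option.some.injEq] at hge
    have hA : ((pvIdxs stats bs).foldl pvIncr (List.replicate n.toNat 0))[j]'(by rw [hlenA]; exact h1)
        = ((pvIdxs stats bs).count ((j : Int)) : Int) := by omega
    have hB : ((PySem.List.pyRange 0 n 1).map (fun j => ((pvIdxs stats bs).count j : Int)))[j]'h2
        = ((pvIdxs stats bs).count ((j : Int)) : Int) := by
      have hcast : n = ((n.toNat : Nat) : Int) := by omega
      have hmp := PySem.List.getElem?_map_pyRange_zero (fun j => ((pvIdxs stats bs).count j : Int)) n.toNat j h1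
      rw [← hcast] at hmp
      rw [List.getElem?_eq_getElem h2] at hmp
      exact Option.some.inj hmp
    rw [hA, hB]

theorem generateHistogramBuckets_changed : Claim_changed_generateHistogramBuckets := by
  unfold Claim_changed_generateHistogramBuckets; decide

theorem generateHistogramBuckets_tight : Claim_exact_generateHistogramBuckets := by
  intro stats bs _ hPre hD heq
  obtain ⟨hb, stat0, hst0, hacc0, hneg⟩ := hD
  have hi0 : pvIdx stat0 bs ∈ pvIdxs stats bs := by
    unfold pvIdxs
    exact List.mem_map.mpr ⟨stat0, List.mem_filter.mpr ⟨hst0, hacc0⟩, rfl⟩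
  have hbounds := pvIdxs_bounds stats bs hPre
  set n := pvBucketCount stats bs with hn
  have hlow : -n ≤ pvIdx stat0 bs := (hbounds _ hi0).1
  have hnpos : 0 < n := by omega
  set j0 : Nat := (pvIdx stat0 bs + n).toNat with hj0
  have hj0n : j0 < n.toNat := by omega
  rw [portA_eq, portB_eq] at heq
  have hlenrep : j0 < (List.replicate n.toNat (0 : Int)).length := by simpa using hj0n
  have hge := foldl_pvIncr_getElem (pvIdxs stats bs) (List.replicate n.toNat 0)
    (by
      intro i hi
      have hbi := hbounds i hi
      simp only [List.length_replicate]
      omega) j0 hlenrep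
  have halias : ((j0 : Int)) - (((List.replicate n.toNat (0 : Int)).length : Nat) : Int) = pvIdx stat0 bs := by
    simp only [List.length_replicate]
    omega
  rw [halias, List.getD_replicate _ hj0n] at hge
  rw [heq] at hge
  have hB := PySem.List.getElem?_map_pyRange_zero
    (fun j => ((pvIdxs stats bs).count j : Int)) n.toNat j0 hj0n
  have hcast : n = ((n.toNat : Nat) : Int) := by omega
  rw [← hcast] at hB
  rw [hB] at hge
  simp only [Option.some.injEq] at hge
  have hcnt : (pvIdxs stats bs).count (pvIdx stat0 bs) = 0 := by omega
  rw [List.count_eq_zero] at hcnt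
  exact hcnt hi0
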